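-- pv_equiv track=rewrite | github.com/andreevstepan9633/veniaeu | reprehen.py | compute_node_depths
-- ===== SOURCE A (Python) =====
-- def compute_node_depths(graph):
--     depths = {}
--
--     def dfs(node, depth):
--         if node in depths:
--             return
--         depths[node] = depth
--         for neighbor in graph[node]:
--             dfs(neighbor, depth + 1)
--
--     for node in graph:
--         dfs(node, 0)
--
--     return depths
-- ===== SOURCE B (Python) =====
-- def compute_node_depths(graph):
--     depths = {}
--     for start in graph:
--         stack = [(start, 0)]
--         while stack:
--             node, depth = stack.pop()
--             if node in depths:
--                 continue
--             depths[node] = depth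
--             for neighbor in reversed(graph[node]):
--                 stack.append((neighbor, depth + 1))
--     return depths
-- ===== Notes on version B (the rewrite author's own statement) =====
-- stated objective: alternative
-- what changed: Replaces the nested recursive dfs helper with an explicit LIFO stack of (node, depth) tasks, pushing neighbors in reversed order and testing membership at pop time, so the same preorder depths are assigned without Python recursion.
import Mathlib
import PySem

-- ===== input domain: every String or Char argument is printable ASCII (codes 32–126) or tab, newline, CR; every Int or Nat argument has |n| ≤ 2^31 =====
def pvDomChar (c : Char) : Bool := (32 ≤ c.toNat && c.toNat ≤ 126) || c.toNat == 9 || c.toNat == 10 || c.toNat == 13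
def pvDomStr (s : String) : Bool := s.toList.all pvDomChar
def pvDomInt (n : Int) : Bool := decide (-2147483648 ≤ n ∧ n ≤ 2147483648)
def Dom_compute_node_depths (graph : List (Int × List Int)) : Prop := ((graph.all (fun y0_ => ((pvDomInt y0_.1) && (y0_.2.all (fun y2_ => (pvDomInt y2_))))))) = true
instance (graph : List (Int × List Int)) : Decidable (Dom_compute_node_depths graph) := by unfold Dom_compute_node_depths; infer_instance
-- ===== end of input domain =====

-- ===== PORT A =====
-- B changes: recursion replaced by an explicit LIFO stack of (node, depth) tasks (objective: alternative decomposition).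
-- Python dict access graph[node]: first-match lookup on the association list; the [] default and the fuel
-- argument (recursion-depth guard, never exhausted on inputs satisfying Pre_) only totalize the function —
-- inputs where Python raises KeyError are excluded by Pre_compute_node_depths.
def pvNbrs (graph : List (Int × List Int)) (n : Int) : List Int :=
  (PySem.Dict.mk graph).getD n []

-- the nested 'def dfs(node, depth)' of A, mutating 'depths'; fuel bounds the recursion depth
def pvDfsA (graph : List (Int × List Int)) :
    Nat → Int → Int → PySem.Dict Int Int → PySem.Dict Int Int
  | 0, _, _, depths => depths
  | fuel + 1, node, depth, depths =>
    if depths.contains node then depths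
    else (pvNbrs graph node).foldl
      (fun d neighbor => pvDfsA graph fuel neighbor (depth + 1) d)
      (depths.insert node depth)

def compute_node_depths (graph : List (Int × List Int)) : List (Int × Int) :=
  (graph.foldl (fun depths p => pvDfsA graph (graph.length + 2) p.1 0 depths)
    PySem.Dict.empty).items

-- ===== PORT B =====
-- the 'while stack:' loop of Source B; the stack is modeled top-at-head, so Python's
-- 'extend with reversed(graph[node]) then pop from the end' is 'prepend the neighbor tasks in order';
-- the fuel argument (an upper bound on the number of pops) only totalizes the loop
def pvLoopB (graph : List (Int × List Int)) :
    Nat → PySem.Dict Int Int → List (Int × Int) → PySem.Dict Int Int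
  | 0, depths, _ => depths
  | _ + 1, depths, [] => depths
  | fuel + 1, depths, (node, depth) :: stack =>
    if depths.contains node then pvLoopB graph fuel depths stack
    else pvLoopB graph fuel (depths.insert node depth)
      ((pvNbrs graph node).map (fun neighbor => (neighbor, depth + 1)) ++ stack)

def pvFuelB (graph : List (Int × List Int)) : Nat :=
  graph.length * ((graph.map (fun p => p.2.length)).sum + 2) + 1

def compute_node_depths_alt (graph : List (Int × List Int)) : List (Int × Int) :=
  (graph.foldl (fun depths p => pvLoopB graph (pvFuelB graph) depths [(p.1, 0)])
    PySem.Dict.empty).items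

-- ===== PRECONDITION & SPEC =====
-- Pre_ excludes graphs with a neighbor that is not a key of the graph: there Python A (and B) raises KeyError.
def Pre_compute_node_depths (graph : List (Int × List Int)) : Prop :=
  ∀ p ∈ graph, ∀ m ∈ p.2, m ∈ graph.map Prod.fst
instance (graph : List (Int × List Int)) : Decidable (Pre_compute_node_depths graph) := by
  unfold Pre_compute_node_depths; infer_instance
def pvWitness_compute_node_depths : (List (Int × List Int)) := [(0, [1, 2]), (1, [0]), (2, [])]

def Spec_compute_node_depths (graph : List (Int × List Int)) (out : List (Int × Int)) : Prop := out = compute_node_depths_alt graph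
instance (graph : List (Int × List Int)) (out : List (Int × Int)) : Decidable (Spec_compute_node_depths graph out) := by unfold Spec_compute_node_depths; infer_instance

-- ===== CLAIM (what is proved, stated in full; the proofs are below) =====
def Claim_equal_compute_node_depths : Prop := ∀ (graph : List (Int × List Int)), Dom_compute_node_depths graph → Pre_compute_node_depths graph → Spec_compute_node_depths graph (compute_node_depths graph)

-- ===== LEMMAS AND PROOFS =====

-- number of graph keys not yet assigned a depth: the termination measure
def pvUndone (graph : List (Int × List Int)) (d : PySem.Dict Int Int) : Nat :=
  (graph.map Prod.fst).countP (fun k => !(d.contains k))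

lemma pvNbrs_eq_nil_of_not_key (graph : List (Int × List Int)) (n : Int)
    (h : n ∉ graph.map Prod.fst) : pvNbrs graph n = [] := by
  unfold pvNbrs
  rw [PySem.Dict.getD_eq_get?_getD]
  have : (PySem.Dict.mk graph).get? n = none := by
    rw [PySem.Dict.get?_eq_none_iff_not_mem_keys]
    simpa [PySem.Dict.keys] using h
  simp [this]

lemma pvNbrs_len_le (graph : List (Int × List Int)) (n : Int) :
    (pvNbrs graph n).length ≤ (graph.map (fun p => p.2.length)).sum := by
  by_cases h : (PySem.Dict.mk graph).get? n = none
  · unfold pvNbrs; rw [PySem.Dict.getD_eq_get?_getD, h]; simp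
  · obtain ⟨l, hl⟩ := Option.ne_none_iff_exists'.mp h
    have hmem : (n, l) ∈ (PySem.Dict.mk graph).items := PySem.Dict.mem_items_of_get?_eq_some _ hl
    have hmem' : (n, l) ∈ graph := hmem
    have : l.length ∈ graph.map (fun p => p.2.length) := by
      exact List.mem_map.mpr ⟨(n, l), hmem', rfl⟩
    have hle := List.le_sum_of_mem this
    unfold pvNbrs
    rw [PySem.Dict.getD_eq_get?_getD, hl]
    simpa using hle

lemma pvUndone_le (graph : List (Int × List Int)) (d : PySem.Dict Int Int) :
    pvUndone graph d ≤ graph.length := by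
  unfold pvUndone
  calc (graph.map Prod.fst).countP (fun k => !(d.contains k))
      ≤ (graph.map Prod.fst).length := List.countP_le_length
    _ = graph.length := by simp

lemma pvCountP_lt {l : List Int} {p q : Int → Bool} {a : Int} (ha : a ∈ l)
    (hmono : ∀ x, p x = true → q x = true) (hpa : p a = false) (hqa : q a = true) :
    l.countP p < l.countP q := by
  induction l with
  | nil => cases ha
  | cons x xs ih =>
    rcases List.mem_cons.mp ha with rfl | hxs
    · have hm : xs.countP p ≤ xs.countP q := List.countP_mono_left (fun x _ => hmono x)
      simp [hpa, hqa]
      omega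
    · rw [List.countP_cons, List.countP_cons]
      have := ih hxs
      have hx : (if p x then 1 else 0) ≤ (if q x then 1 else 0) := by
        by_cases h : p x = true
        · simp [h, hmono x h]
        · simp only [Bool.not_eq_true] at h; simp [h]
      omega

lemma pvUndone_insert_lt (graph : List (Int × List Int)) (d : PySem.Dict Int Int) (n v : Int)
    (hkey : n ∈ graph.map Prod.fst) (hc : d.contains n = false) :
    pvUndone graph (d.insert n v) < pvUndone graph d := by
  apply pvCountP_lt hkey
  · intro x hx
    rw [Bool.not_eq_eq_eq_not, Bool.not_true, PySem.Dict.contains_insert] at hx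
    simp only [Bool.or_eq_false_iff] at hx
    simp [hx.2]
  · simp
  · simp [hc]

lemma pvUndone_insert_eq_of_not_key (graph : List (Int × List Int)) (d : PySem.Dict Int Int)
    (n v : Int) (hkey : n ∉ graph.map Prod.fst) :
    pvUndone graph (d.insert n v) = pvUndone graph d := by
  apply List.countP_congr
  intro k hk
  have hne : k ≠ n := fun h => hkey (h ▸ hk)
  rw [PySem.Dict.contains_insert]
  simp [hne]

-- fuel-free reference form of the worklist loop, by well-founded recursion
def pvRun (graph : List (Int × List Int)) (depths : PySem.Dict Int Int) :
    List (Int × Int) → PySem.Dict Int Int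
  | [] => depths
  | (node, depth) :: stack =>
    if h : depths.contains node then pvRun graph depths stack
    else pvRun graph (depths.insert node depth)
      ((pvNbrs graph node).map (fun neighbor => (neighbor, depth + 1)) ++ stack)
termination_by stack => (pvUndone graph depths, stack.length)
decreasing_by
  · exact Prod.Lex.right _ (by simp)
  · by_cases hkey : node ∈ graph.map Prod.fst
    · exact Prod.Lex.left _ _ (pvUndone_insert_lt graph depths node depth hkey (by simpa using h))
    · rw [pvNbrs_eq_nil_of_not_key graph node hkey,
        pvUndone_insert_eq_of_not_key graph depths node depth hkey]
      exact Prod.Lex.right _ (by simp)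

lemma pvDfsA_contains_mono (graph : List (Int × List Int)) :
    ∀ (f : Nat) (n dep : Int) (d : PySem.Dict Int Int) (k : Int),
      d.contains k = true → (pvDfsA graph f n dep d).contains k = true := by
  intro f
  induction f with
  | zero => intro n dep d k hk; simpa [pvDfsA] using hk
  | succ f ih =>
    intro n dep d k hk
    rw [pvDfsA]
    split
    · exact hk
    · have hfold : ∀ (l : List Int) (d' : PySem.Dict Int Int), d'.contains k = true →
          (l.foldl (fun d nb => pvDfsA graph f nb (dep + 1) d) d').contains k = true := by
        intro l
        induction l with
        | nil => intro d' h; simpa using h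
        | cons x xs ihl => intro d' h; exact ihl _ (ih x (dep + 1) d' k h)
      exact hfold _ _ (by rw [PySem.Dict.contains_insert]; simp [hk])

lemma pvUndone_dfsA_le (graph : List (Int × List Int)) (f : Nat) (n dep : Int)
    (d : PySem.Dict Int Int) : pvUndone graph (pvDfsA graph f n dep d) ≤ pvUndone graph d := by
  apply List.countP_mono_left
  intro k _ hk
  rw [Bool.not_eq_eq_eq_not, Bool.not_true] at hk ⊢
  by_contra h
  rw [Bool.not_eq_false] at h
  have := pvDfsA_contains_mono graph f n dep d k h
  rw [this] at hk; cases hk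

-- the stack loop of B computes the fuel-free reference when the fuel covers the measure
lemma pvLoopB_eq_run (graph : List (Int × List Int)) :
    ∀ (fuel : Nat) (d : PySem.Dict Int Int) (stack : List (Int × Int)),
      stack.length + ((graph.map (fun p => p.2.length)).sum + 2) * pvUndone graph d ≤ fuel →
      pvLoopB graph fuel d stack = pvRun graph d stack := by
  intro fuel
  induction fuel with
  | zero =>
    intro d stack h
    have : stack = [] := List.eq_nil_of_length_eq_zero (by omega)
    subst this
    rw [pvLoopB, pvRun]
  | succ fuel ih =>
    intro d stack h
    match stack with
    | [] => rw [pvLoopB, pvRun]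
    | (node, depth) :: rest =>
      rw [pvLoopB, pvRun]
      by_cases hc : d.contains node = true
      · rw [if_pos hc, dif_pos hc]
        exact ih d rest (by simp at h; omega)
      · rw [if_neg hc, dif_neg hc]
        rw [Bool.not_eq_true] at hc
        apply ih
        by_cases hkey : node ∈ graph.map Prod.fst
        · have h1 := pvUndone_insert_lt graph d node depth hkey hc
          have h2 := pvNbrs_len_le graph node
          have h3 : ((pvNbrs graph node).map (fun nb => (nb, depth + 1)) ++ rest).length
              = (pvNbrs graph node).length + rest.length := by simp
          simp only [List.length_cons] at h
          rw [h3]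
          have h4 : pvUndone graph (d.insert node depth) + 1 ≤ pvUndone graph d := h1
          calc (pvNbrs graph node).length + rest.length
              + ((graph.map (fun p => p.2.length)).sum + 2) * pvUndone graph (d.insert node depth)
              ≤ (graph.map (fun p => p.2.length)).sum + rest.length
                + ((graph.map (fun p => p.2.length)).sum + 2) * (pvUndone graph d - 1) := by
                have := Nat.mul_le_mul_left ((graph.map (fun p => p.2.length)).sum + 2)
                  (Nat.le_sub_one_of_lt h1)
                omega
            _ ≤ fuel := by
                have hpos : 1 ≤ pvUndone graph d := by omega
                have : ((graph.map (fun p => p.2.length)).sum + 2) * (pvUndone graph d - 1)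
                    + ((graph.map (fun p => p.2.length)).sum + 2)
                    = ((graph.map (fun p => p.2.length)).sum + 2) * pvUndone graph d := by
                  rw [← Nat.mul_succ]
                  congr 1
                  omega
                omega
        · rw [pvNbrs_eq_nil_of_not_key graph node hkey,
            pvUndone_insert_eq_of_not_key graph d node depth hkey]
          simp only [List.map_nil, List.nil_append]
          simp only [List.length_cons] at h
          omega

-- the recursive dfs of A, run against the reference worklist: processing (node, depth) first
lemma pvRun_dfsA (graph : List (Int × List Int)) :
    ∀ (f : Nat) (d : PySem.Dict Int Int) (n dep : Int) (ts : List (Int × Int)),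
      pvUndone graph d + 1 ≤ f →
      pvRun graph (pvDfsA graph f n dep d) ts = pvRun graph d ((n, dep) :: ts) := by
  intro f
  induction f with
  | zero => intro d n dep ts h; omega
  | succ f ih =>
    intro d n dep ts h
    rw [pvDfsA]
    by_cases hc : d.contains n = true
    · rw [if_pos hc, pvRun, dif_pos hc]
    · rw [if_neg hc]
      rw [Bool.not_eq_true] at hc
      conv_rhs => rw [pvRun]
      rw [dif_neg (by simp [hc])]
      by_cases hkey : n ∈ graph.map Prod.fst
      · have hstart : pvUndone graph (d.insert n dep) + 1 ≤ f := by
          have := pvUndone_insert_lt graph d n dep hkey hc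
          omega
        have hfold : ∀ (l : List Int) (d' : PySem.Dict Int Int),
            pvUndone graph d' + 1 ≤ f →
            pvRun graph (l.foldl (fun dd nb => pvDfsA graph f nb (dep + 1) dd) d') ts
              = pvRun graph d' (l.map (fun m => (m, dep + 1)) ++ ts) := by
          intro l
          induction l with
          | nil => intro d' _; simp
          | cons x xs ihl =>
            intro d' hd'
            simp only [List.foldl_cons, List.map_cons, List.cons_append]
            rw [← ih d' x (dep + 1) (xs.map (fun m => (m, dep + 1)) ++ ts) hd']
            apply ihl
            have := pvUndone_dfsA_le graph f x (dep + 1) d'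
            omega
        exact hfold _ _ hstart
      · rw [pvNbrs_eq_nil_of_not_key graph n hkey]
        simp

lemma pvPerNode (graph : List (Int × List Int)) (d : PySem.Dict Int Int) (n : Int) :
    pvLoopB graph (pvFuelB graph) d [(n, 0)] = pvDfsA graph (graph.length + 2) n 0 d := by
  have hb : pvLoopB graph (pvFuelB graph) d [(n, 0)] = pvRun graph d [(n, 0)] := by
    apply pvLoopB_eq_run
    unfold pvFuelB
    have h1 := pvUndone_le graph d
    have h2 := Nat.mul_le_mul_left ((graph.map (fun p => p.2.length)).sum + 2) h1
    have h3 : ((graph.map (fun p => p.2.length)).sum + 2) * graph.length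
        = graph.length * ((graph.map (fun p => p.2.length)).sum + 2) := Nat.mul_comm _ _
    simp only [List.length_cons, List.length_nil]
    omega
  have ha : pvRun graph (pvDfsA graph (graph.length + 2) n 0 d) [] = pvRun graph d [(n, 0)] := by
    apply pvRun_dfsA
    have := pvUndone_le graph d
    omega
  rw [hb, ← ha, pvRun]

lemma pvFoldEq (graph : List (Int × List Int)) :
    ∀ (l : List (Int × List Int)) (d : PySem.Dict Int Int),
      l.foldl (fun depths p => pvLoopB graph (pvFuelB graph) depths [(p.1, 0)]) d
        = l.foldl (fun depths p => pvDfsA graph (graph.length + 2) p.1 0 depths) d := by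
  intro l
  induction l with
  | nil => intro d; rfl
  | cons x xs ih =>
    intro d
    simp only [List.foldl_cons]
    rw [pvPerNode graph d x.1, ih]

-- ===== VERDICT (by name: the statement is the Claim_ definition above) =====
theorem compute_node_depths_spec : Claim_equal_compute_node_depths := by
  intro graph _ _
  unfold Spec_compute_node_depths compute_node_depths compute_node_depths_alt
  rw [pvFoldEq graph graph PySem.Dict.empty]
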